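-- pv_equiv track=rewrite | github.com/Mateusz-Dobrzynski/matura | 2015/4.1.py | hasMoreZerosThanOnes
-- ===== SOURCE A (Python) =====
-- def hasMoreZerosThanOnes(line):
--     zerosCount = 0
--     onesCount = 0
--     for i in range(len(line)):
--         if line[i] == '0':
--             zerosCount += 1
--         else:
--             onesCount += 1
--     if zerosCount > onesCount:
--         return True
--     return False
-- ===== SOURCE B (Python) =====
-- def hasMoreZerosThanOnes(line):
--     # Majority-by-median: stably sort the characters so that '0's come first
--     # (key False < True); '0' is the strict majority iff the middle element
--     # of the sorted sequence is '0'.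
--     s = sorted(line, key=lambda c: c != '0')
--     n = len(s)
--     return n > 0 and s[n // 2] == '0'
-- ===== Notes on version B (the rewrite author's own statement) =====
-- stated objective: alternative
-- what changed: Replaces the dual-accumulator counting loop with a majority-by-median test: sort the characters with key (c != '0') so zeros come first, then the answer is whether the middle element s[n//2] of the sorted sequence is '0' (strict majority iff the median slot holds a zero).
import Mathlib
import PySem

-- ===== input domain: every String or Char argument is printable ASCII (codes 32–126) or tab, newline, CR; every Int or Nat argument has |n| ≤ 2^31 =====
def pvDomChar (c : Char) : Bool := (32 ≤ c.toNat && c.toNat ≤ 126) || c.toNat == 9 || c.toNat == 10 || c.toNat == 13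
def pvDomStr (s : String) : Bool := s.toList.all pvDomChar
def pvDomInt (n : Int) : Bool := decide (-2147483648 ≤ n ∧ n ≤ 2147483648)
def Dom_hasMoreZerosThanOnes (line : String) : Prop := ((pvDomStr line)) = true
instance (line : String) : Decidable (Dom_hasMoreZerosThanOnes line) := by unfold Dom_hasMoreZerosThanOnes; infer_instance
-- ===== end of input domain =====

-- B replaces A's dual-accumulator counting loop with a majority-by-median test: stably
-- sort the characters so zeros come first and look at the middle element (alternative).
-- ===== PORT A =====
def hasMoreZerosThanOnes (line : String) : Bool :=
  let cs := line.toList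
  let p := (PySem.List.pyRange 0 (PySem.Str.len line) 1).foldl
    (fun (p : Int × Int) i =>
      if PySem.List.pyGetD cs i ' ' == '0' then (p.1 + 1, p.2) else (p.1, p.2 + 1))
    ((0 : Int), (0 : Int))
  if p.1 > p.2 then true else false

-- ===== PORT B =====
def hasMoreZerosThanOnes_alt (line : String) : Bool :=
  let s := PySem.List.sorted line.toList (fun c => c != '0') false
  let n := s.length
  if n = 0 then false
  else
    match PySem.List.pyGet? s (PySem.Int.floordiv (n : Int) 2) with
    | some c => c == '0'
    | none => false  -- unreachable: n//2 < n when n > 0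

-- ===== PRECONDITION & SPEC =====
def Spec_hasMoreZerosThanOnes (line : String) (out : Bool) : Prop := out = hasMoreZerosThanOnes_alt line
instance (line : String) (out : Bool) : Decidable (Spec_hasMoreZerosThanOnes line out) := by unfold Spec_hasMoreZerosThanOnes; infer_instance

-- ===== CLAIM (what is proved, stated in full; the proofs are below) =====
def Claim_equal_hasMoreZerosThanOnes : Prop := ∀ (line : String), Dom_hasMoreZerosThanOnes line → Spec_hasMoreZerosThanOnes line (hasMoreZerosThanOnes line)

-- ===== LEMMAS AND PROOFS =====

-- A's loop computes (zeros, ones) = (count '0', length - count '0')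
lemma foldl_pair (l : List Char) : ∀ (z o : Int),
    l.foldl (fun (p : Int × Int) c =>
      if c == '0' then (p.1 + 1, p.2) else (p.1, p.2 + 1)) (z, o)
      = (z + (l.count '0' : Int), o + ((l.length : Int) - (l.count '0' : Int))) := by
  induction l with
  | nil => intro z o; simp
  | cons x t ih =>
    intro z o
    rw [List.foldl_cons]
    by_cases hx : x = '0'
    · rw [if_pos (by simp [hx])]
      rw [ih]
      simp only [Prod.mk.injEq, List.count_cons, List.length_cons, hx, beq_self_eq_true, if_true]
      constructor <;> (push_cast; ring)
    · rw [if_neg (by simp [hx])]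
      rw [ih]
      have hb : ((x == '0') = false) := by simp [hx]
      simp only [Prod.mk.injEq, List.count_cons, List.length_cons, hb]
      constructor <;> (push_cast; ring)

-- in a list that is key-monotone for key (c != '0'), position i holds '0' iff i < count '0'
lemma zeros_prefix : ∀ (s : List Char),
    s.Pairwise (fun a b => (a != '0') ≤ (b != '0')) →
    ∀ i (hi : i < s.length), (s[i] = '0' ↔ i < s.count '0') := by
  intro s
  induction s with
  | nil => intro _ i hi; simp at hi
  | cons x t ih =>
    intro hp i hi
    rcases List.pairwise_cons.mp hp with ⟨hx, ht⟩
    by_cases hx0 : x = '0'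
    · subst hx0
      cases i with
      | zero => simp
      | succ j =>
        have hj : j < t.length := by simpa using hi
        simp only [List.getElem_cons_succ, List.count_cons, beq_self_eq_true, if_true]
        rw [ih ht j hj]
        omega
    · -- x ≠ '0', so key x = true, hence every later element is non-'0'
      have hall : ∀ y ∈ t, y ≠ '0' := by
        intro y hy hy0
        have := hx y hy
        rw [hy0] at this
        have hxk : (x != '0') = true := bne_iff_ne.mpr hx0
        rw [hxk, bne_self_eq_false] at this
        exact absurd this (by decide)
      have hcz : t.count '0' = 0 := by
        rw [List.count_eq_zero]
        intro h; exact hall '0' h rfl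
      have hcz' : (x :: t).count '0' = 0 := by
        simp [hcz, hx0]
      rw [hcz']
      cases i with
      | zero => simp [hx0]
      | succ j =>
        have hj : j < t.length := by simpa using hi
        simp only [List.getElem_cons_succ]
        constructor
        · intro h; exact absurd h (hall _ (List.getElem_mem hj))
        · omega

-- ===== VERDICT (by name: the statement is the Claim_ definition above) =====
theorem hasMoreZerosThanOnes_spec : Claim_equal_hasMoreZerosThanOnes := by
  intro line _
  unfold Spec_hasMoreZerosThanOnes hasMoreZerosThanOnes hasMoreZerosThanOnes_alt
  simp only [PySem.Str.len_eq]
  simp only [PySem.List.foldl_pyRange_zero_pyGetD' line.toList ' '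
    (fun (p : Int × Int) c => if c == '0' then (p.1 + 1, p.2) else (p.1, p.2 + 1))
    ((0 : Int), (0 : Int))]
  simp only [foldl_pair]
  set l := line.toList with hl
  set s := PySem.List.sorted l (fun c => c != '0') false with hs
  have hperm : s.Perm l := PySem.List.sorted_perm ..
  have hlen : s.length = l.length := hperm.length_eq
  have hcnt : s.count '0' = l.count '0' := hperm.count_eq '0'
  have hc_le : l.count '0' ≤ l.length := List.count_le_length
  by_cases hn : s.length = 0
  · -- empty string
    have hl0 : l.length = 0 := by omega
    have hc0 : l.count '0' = 0 := by omega
    simp [hn, hl0, hc0]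
  · rw [if_neg hn]
    have hm : s.length / 2 < s.length := by omega
    have hfd : PySem.Int.floordiv (s.length : Int) 2 = ((s.length / 2 : Nat) : Int) :=
      PySem.Int.floordiv_natCast s.length 2
    rw [hfd, PySem.List.pyGet?_natCast]
    rw [List.getElem?_eq_getElem hm]
    have hpw : s.Pairwise (fun a b => (a != '0') ≤ (b != '0')) :=
      PySem.List.sorted_pairwise ..
    have hchar := zeros_prefix s hpw (s.length / 2) hm
    by_cases hz : s.length / 2 < s.count '0'
    · have h0 : s[s.length / 2] = '0' := hchar.mpr hz
      have hgt : (0 : Int) + (l.count '0' : Int) > 0 + ((l.length : Int) - (l.count '0' : Int)) := by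
        rw [← hcnt, ← hlen]; omega
      simp only [h0, beq_self_eq_true]
      rw [if_pos hgt]
    · have h0 : s[s.length / 2] ≠ '0' := fun h => hz (hchar.mp h)
      have hgt : ¬ ((0 : Int) + (l.count '0' : Int) > 0 + ((l.length : Int) - (l.count '0' : Int))) := by
        rw [← hcnt, ← hlen]; omega
      rw [if_neg hgt]
      simp [h0]
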